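-- pv_equiv track=rewrite | github.com/ClementBraunNSI/nsi-courses | interro_2025_2026/B3/B3 - Braun (2025-2027)-DS Python G1-4825/Lucas Nortier_24134_assignsubmission_file/dsb3-25-11.py | masquer_motdepasse
-- ===== SOURCE A (Python) =====
-- def masquer_motdepasse(chaine:str)->str:
-- 	chiffrer = ""
-- 	nb_carac = len(chaine)
-- 	if len(chaine) <=2 :
-- 		return chaine
-- 	for i in range(len(chaine)):
-- 		if i == 0  or i == (len(chaine)-1):
-- 			chiffrer = chiffrer + chaine[i]
-- 		else :
-- 			chiffrer = chiffrer + "*"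
-- 	return chiffrer
-- ===== SOURCE B (Python) =====
-- def masquer_motdepasse(chaine: str) -> str:
--     if len(chaine) <= 2:
--         return chaine
--     return chaine[0] + "*" * (len(chaine) - 2) + chaine[-1]
-- ===== Notes on version B (the rewrite author's own statement) =====
-- stated objective: simpler
-- what changed: Replaces the per-character index loop (with an if/else on first/last position and repeated string concatenation) by one closed-form expression: first char + a run of asterisks of length len-2 + last char.
import Mathlib
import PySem

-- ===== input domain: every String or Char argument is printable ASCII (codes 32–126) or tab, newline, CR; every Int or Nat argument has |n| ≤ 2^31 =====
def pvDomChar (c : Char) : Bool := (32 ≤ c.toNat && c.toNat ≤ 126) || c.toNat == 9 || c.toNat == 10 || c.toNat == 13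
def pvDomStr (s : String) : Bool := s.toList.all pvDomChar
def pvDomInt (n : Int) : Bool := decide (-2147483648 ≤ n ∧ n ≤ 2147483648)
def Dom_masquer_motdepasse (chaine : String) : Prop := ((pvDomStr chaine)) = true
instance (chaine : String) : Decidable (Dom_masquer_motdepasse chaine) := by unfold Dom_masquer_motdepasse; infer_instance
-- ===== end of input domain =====

-- B replaces A's per-index loop (if/else on first/last position) by the closed form
-- first char + '*' * (len-2) + last char; objective: simpler.


-- ===== PORT A =====
-- chaine[i] with 0 ≤ i < len is always in range, ported as getD (default unreachable)
def masquer_motdepasse (chaine : String) : String :=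
  let cs := chaine.toList
  let nb_carac := cs.length
  if nb_carac ≤ 2 then chaine
  else
    String.ofList ((List.range cs.length).foldl
      (fun chiffrer i =>
        if i = 0 ∨ i = cs.length - 1 then chiffrer ++ [cs.getD i ' ']
        else chiffrer ++ ['*']) [])

-- ===== PORT B =====
-- chaine[0] and chaine[-1] (= index len-1) are in range under the guard, ported as getD
def masquer_motdepasse_alt (chaine : String) : String :=
  let cs := chaine.toList
  if cs.length ≤ 2 then chaine
  else String.ofList (cs.getD 0 ' ' :: (List.replicate (cs.length - 2) '*' ++ [cs.getD (cs.length - 1) ' ']))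

-- ===== PRECONDITION & SPEC =====
def Spec_masquer_motdepasse (chaine : String) (out : String) : Prop := out = masquer_motdepasse_alt chaine
instance (chaine : String) (out : String) : Decidable (Spec_masquer_motdepasse chaine out) := by unfold Spec_masquer_motdepasse; infer_instance

-- ===== CLAIM (what is proved, stated in full; the proofs are below) =====
def Claim_equal_masquer_motdepasse : Prop := ∀ (chaine : String), Dom_masquer_motdepasse chaine → Spec_masquer_motdepasse chaine (masquer_motdepasse chaine)

-- ===== LEMMAS AND PROOFS =====

-- the accumulating loop is a map
theorem pv_foldl_push (p : Nat → Prop) [DecidablePred p] (u v : Nat → Char)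
    (l : List Nat) (acc : List Char) :
    l.foldl (fun a i => if p i then a ++ [u i] else a ++ [v i]) acc
      = acc ++ l.map (fun i => if p i then u i else v i) := by
  induction l generalizing acc with
  | nil => simp
  | cons x xs ih => simp only [List.foldl_cons, List.map_cons]; split <;> simp [ih]

theorem pv_map_mask (cs : List Char) (m : Nat) :
    (List.range (m + 3)).map (fun i => if i = 0 ∨ i = m + 2 then cs.getD i ' ' else '*')
      = cs.getD 0 ' ' :: (List.replicate (m + 1) '*' ++ [cs.getD (m + 2) ' ']) := by
  have hmid : (List.range (m + 1)).map
      ((fun i => if i = 0 ∨ i = m + 2 then cs.getD i ' ' else '*') ∘ Nat.succ)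
      = List.replicate (m + 1) '*' := by
    rw [List.eq_replicate_iff]
    refine ⟨by simp, ?_⟩
    intro b hb
    simp only [List.mem_map, List.mem_range, Function.comp] at hb
    obtain ⟨i, hi, hbe⟩ := hb
    rw [if_neg (by omega)] at hbe
    exact hbe.symm
  rw [show m + 3 = (m + 2) + 1 from rfl, List.range_succ, List.range_succ_eq_map]
  simp only [List.map_append, List.map_cons, List.map_map, List.map_nil, List.cons_append]
  rw [hmid]
  simp

-- ===== VERDICT (by name: the statement is the Claim_ definition above) =====
theorem masquer_motdepasse_spec : Claim_equal_masquer_motdepasse := by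
  intro chaine _
  unfold Spec_masquer_motdepasse masquer_motdepasse masquer_motdepasse_alt
  by_cases h : chaine.toList.length ≤ 2
  · rw [if_pos h, if_pos h]
  · rw [if_neg h, if_neg h]
    obtain ⟨m, hm⟩ : ∃ m, chaine.toList.length = m + 3 := ⟨chaine.toList.length - 3, by omega⟩
    rw [pv_foldl_push (fun i => i = 0 ∨ i = chaine.toList.length - 1)
        (fun i => chaine.toList.getD i ' ') (fun _ => '*'), List.nil_append, hm,
      show m + 3 - 1 = m + 2 from rfl, show m + 3 - 2 = m + 1 from rfl,
      pv_map_mask chaine.toList m]
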